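-- pv_equiv track=rewrite | github.com/shihjimmy/GWFA_thesis_code | GWFA_golden.py | generate_edges_from_golden
-- ===== SOURCE A (Python) =====
-- def generate_edges_from_golden(golden_edges, TOTAL_NODES, NUM_EDGES):
--     edges = [0 for _ in range(TOTAL_NODES)]
--     for i in range(0, TOTAL_NODES):
--         edge_bits = 0
--
--         for j in range(i+1, i+1+NUM_EDGES):
--             if j < TOTAL_NODES:
--                 pos = j-i
--                 if golden_edges[j] & (1 << (pos-1)):
--                     edge_bits |= (1 << (NUM_EDGES-pos))
--
--         edges[i] = edge_bits
--
--     return edges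
-- ===== SOURCE B (Python) =====
-- def generate_edges_from_golden(golden_edges, TOTAL_NODES, NUM_EDGES):
--     # Staged bit-plane passes: stage 1 builds, for each edge distance pos, one
--     # whole contribution list (the bit-plane) by slicing golden_edges; stage 2
--     # reduces the planes with an elementwise OR.
--     n = TOTAL_NODES
--     planes = []
--     for pos in range(1, min(NUM_EDGES, n - 1) + 1):  # a plane for a distance >= n is all-zero
--         weight = 1 << (NUM_EDGES - pos)
--         mask = 1 << (pos - 1)
--         col = [weight if g & mask else 0 for g in golden_edges[pos:n]]
--         planes.append(col + [0] * (n - len(col)))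
--     edges = [0] * n
--     for plane in planes:
--         edges = [e | c for e, c in zip(edges, plane)]
--     return edges
-- ===== Notes on version B (the rewrite author's own statement) =====
-- stated objective: alternative
-- what changed: Replaces A's per-node gather (for each target i, an inner scan over its NUM_EDGES successors) by staged bit-plane passes: for each edge distance pos one whole contribution list is built by slicing golden_edges, and the planes are then reduced with a single elementwise-OR pass.
import Mathlib
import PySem

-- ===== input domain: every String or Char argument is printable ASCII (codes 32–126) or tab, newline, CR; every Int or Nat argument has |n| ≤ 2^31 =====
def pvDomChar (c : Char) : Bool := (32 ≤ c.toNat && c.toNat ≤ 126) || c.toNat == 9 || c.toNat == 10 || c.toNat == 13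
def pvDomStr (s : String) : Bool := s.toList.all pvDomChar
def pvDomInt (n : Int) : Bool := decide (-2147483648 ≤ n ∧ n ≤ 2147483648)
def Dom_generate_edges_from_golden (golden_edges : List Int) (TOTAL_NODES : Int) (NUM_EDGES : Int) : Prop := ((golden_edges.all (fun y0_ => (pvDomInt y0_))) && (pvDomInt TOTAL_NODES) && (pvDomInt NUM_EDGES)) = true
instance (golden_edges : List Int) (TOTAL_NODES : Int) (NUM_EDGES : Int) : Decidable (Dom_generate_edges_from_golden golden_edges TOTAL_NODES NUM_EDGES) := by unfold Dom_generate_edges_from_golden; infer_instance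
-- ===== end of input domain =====

-- B replaces A's per-node gather (inner scan over each node's NUM_EDGES successors)
-- by staged bit-plane passes: one contribution list per edge distance, built by
-- slicing golden_edges, then reduced with an elementwise OR; same cost, a
-- different decomposition.

-- Python's 1 << k for k ≥ 0 (shared shift helper of both ports)
def pvBit (k : Int) : Int := (1:Int) <<< k.toNat

-- ===== PORT A =====
def generate_edges_from_golden (golden_edges : List Int) (TOTAL_NODES : Int) (NUM_EDGES : Int) : List Int :=
  let edges := (PySem.List.pyRange 0 TOTAL_NODES 1).map (fun _ => (0 : Int))
  (PySem.List.pyRange 0 TOTAL_NODES 1).foldl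
    (fun edges i =>
      let edge_bits := (PySem.List.pyRange (i+1) (i+1+NUM_EDGES) 1).foldl
        (fun acc j =>
          if j < TOTAL_NODES then
            if PySem.Int.band (PySem.List.pyGetD golden_edges j 0) (pvBit ((j - i) - 1)) ≠ 0 then
              PySem.Int.bor acc (pvBit (NUM_EDGES - (j - i)))
            else acc
          else acc) 0
      edges.set i.toNat edge_bits)
    edges

-- ===== PORT B =====
def generate_edges_from_golden_alt (golden_edges : List Int) (TOTAL_NODES : Int) (NUM_EDGES : Int) : List Int :=
  -- a plane for a distance ≥ TOTAL_NODES is all-zero, so the distance loop stops at TOTAL_NODES-1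
  let planes := (PySem.List.pyRange 1 (min NUM_EDGES (TOTAL_NODES - 1) + 1) 1).foldl
    (fun planes pos =>
      let weight := pvBit (NUM_EDGES - pos)
      let mask := pvBit (pos - 1)
      let col := (PySem.List.slice golden_edges (some pos) (some TOTAL_NODES)).map
        (fun g => if PySem.Int.band g mask ≠ 0 then weight else (0:Int))
      planes ++ [col ++ List.replicate (TOTAL_NODES - (col.length : Int)).toNat 0]) []
  planes.foldl
    (fun edges plane => (edges.zip plane).map (fun p => PySem.Int.bor p.1 p.2))
    (List.replicate TOTAL_NODES.toNat 0)

-- ===== PRECONDITION & SPEC =====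
-- Pre_ excludes exactly the inputs on which the Python A raises IndexError: with
-- at least one edge per node and at least two nodes, A reads
-- golden_edges[1..TOTAL_NODES-1], so golden_edges needs at least TOTAL_NODES entries.
def Pre_generate_edges_from_golden (golden_edges : List Int) (TOTAL_NODES : Int) (NUM_EDGES : Int) : Prop :=
  NUM_EDGES < 1 ∨ TOTAL_NODES ≤ 1 ∨ TOTAL_NODES ≤ (golden_edges.length : Int)
instance (golden_edges : List Int) (TOTAL_NODES : Int) (NUM_EDGES : Int) : Decidable (Pre_generate_edges_from_golden golden_edges TOTAL_NODES NUM_EDGES) := by unfold Pre_generate_edges_from_golden; infer_instance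
def pvWitness_generate_edges_from_golden : List Int × Int × Int := ([7, 3, 2, 1], 4, 2)

def Spec_generate_edges_from_golden (golden_edges : List Int) (TOTAL_NODES : Int) (NUM_EDGES : Int) (out : List Int) : Prop := out = generate_edges_from_golden_alt golden_edges TOTAL_NODES NUM_EDGES
instance (golden_edges : List Int) (TOTAL_NODES : Int) (NUM_EDGES : Int) (out : List Int) : Decidable (Spec_generate_edges_from_golden golden_edges TOTAL_NODES NUM_EDGES out) := by unfold Spec_generate_edges_from_golden; infer_instance

-- ===== CLAIM (what is proved, stated in full; the proofs are below) =====
def Claim_equal_generate_edges_from_golden : Prop := ∀ (golden_edges : List Int) (TOTAL_NODES : Int) (NUM_EDGES : Int), Dom_generate_edges_from_golden golden_edges TOTAL_NODES NUM_EDGES → Pre_generate_edges_from_golden golden_edges TOTAL_NODES NUM_EDGES → Spec_generate_edges_from_golden golden_edges TOTAL_NODES NUM_EDGES (generate_edges_from_golden golden_edges TOTAL_NODES NUM_EDGES)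

-- ===== LEMMAS AND PROOFS =====

-- The mask of target node i built from edge distances pos = 1..M (with targets < T).
def pvMaskUpto (g : List Int) (NUM T M i : Int) : Int :=
  (PySem.List.pyRange 1 (M+1) 1).foldl
    (fun acc pos =>
      if i + pos < T ∧ PySem.Int.band (PySem.List.pyGetD g (i+pos) 0) (pvBit (pos - 1)) ≠ 0 then
        PySem.Int.bor acc (pvBit (NUM - pos))
      else acc) 0

-- B's bit-plane for edge distance pos (col written out twice: no let, so rw matches).
def pvPlane (g : List Int) (NUM T pos : Int) : List Int :=
  (PySem.List.slice g (some pos) (some T)).map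
      (fun x => if PySem.Int.band x (pvBit (pos - 1)) ≠ 0 then pvBit (NUM - pos) else (0:Int))
    ++ List.replicate
      (T - (((PySem.List.slice g (some pos) (some T)).map
        (fun x => if PySem.Int.band x (pvBit (pos - 1)) ≠ 0 then pvBit (NUM - pos) else (0:Int))).length : Int)).toNat 0

-- A's inner loop is pvMaskUpto with all NUM distances.
theorem pvA_inner (g : List Int) (T NUM i : Int) :
    (PySem.List.pyRange (i+1) (i+1+NUM) 1).foldl
      (fun acc j =>
        if j < T then
          if PySem.Int.band (PySem.List.pyGetD g j 0) (pvBit ((j - i) - 1)) ≠ 0 then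
            PySem.Int.bor acc (pvBit (NUM - (j - i)))
          else acc
        else acc) 0
    = pvMaskUpto g NUM T NUM i := by
  unfold pvMaskUpto
  rw [PySem.List.pyRange_one (i+1) (i+1+NUM), PySem.List.pyRange_one 1 (NUM+1),
      List.foldl_map, List.foldl_map]
  have hn : (i+1+NUM - (i+1)).toNat = (NUM+1-1).toNat := by omega
  rw [hn]
  apply PySem.List.foldl_congr_mem
  intro acc k hk
  have e1 : i + 1 + (k:Int) - i - 1 = (1 + (k:Int)) - 1 := by ring
  have e2 : i + 1 + (k:Int) - i = 1 + k := by ring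
  have e3 : i + (1 + (k:Int)) = i + 1 + k := by ring
  rw [e1, e2, e3]
  split_ifs with h1 h2 h3 h3 <;> first | rfl | (exfalso; omega)

theorem pvA_outer (f : Int → Int) (n : Nat) (l : List Int) (hn : n ≤ l.length) :
    (PySem.List.pyRange 0 (n : Int) 1).foldl (fun e i => e.set i.toNat (f i)) l
    = (PySem.List.pyRange 0 (n : Int) 1).map f ++ l.drop n := by
  induction n with
  | zero => simp [PySem.List.pyRange_one_eq_nil]
  | succ n ih =>
    have h1 : ((n+1 : Nat) : Int) = (n : Int) + 1 := by push_cast; ring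
    rw [h1, PySem.List.pyRange_one_succ_right (a := 0) (b := (n:Int)) (by omega), List.foldl_append,
        List.map_append, ih (by omega)]
    have hlen : ((PySem.List.pyRange 0 (n:Int) 1).map f).length = n := by
      simp [PySem.List.length_pyRange_one]
    simp only [List.foldl_cons, List.foldl_nil]
    rw [List.set_append_right _ _ (by omega)]
    have hdrop : l.drop n = l[n] :: l.drop (n+1) := List.drop_eq_getElem_cons (by omega)
    rw [hlen, Int.toNat_natCast]
    simp only [List.append_assoc, List.map_cons, List.map_nil, List.cons_append, List.nil_append,
      List.append_cancel_left_eq]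
    rw [hdrop]
    simp only [Nat.sub_self, List.set_cons_zero]

theorem pvA_outer' (f : Int → Int) (T : Int) (l : List Int) (hn : T.toNat ≤ l.length) :
    (PySem.List.pyRange 0 T 1).foldl (fun e i => e.set i.toNat (f i)) l
    = (PySem.List.pyRange 0 T 1).map f ++ l.drop T.toNat := by
  by_cases hT : 0 ≤ T
  · have : ((T.toNat : Nat) : Int) = T := Int.toNat_of_nonneg hT
    rw [← this]
    exact pvA_outer f T.toNat l hn
  · rw [PySem.List.pyRange_one_eq_nil (a := 0) (b := T) (by omega)]
    simp only [List.foldl_nil, List.map_nil, List.nil_append]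
    have : T.toNat = 0 := by omega
    rw [this, List.drop_zero]

-- replicate T zeros, written as a map over the index range
theorem pvReplicate_eq_map (T : Int) :
    List.replicate T.toNat (0:Int) = (PySem.List.pyRange 0 T 1).map (fun _ => (0:Int)) := by
  rw [List.map_const']
  congr 1
  rw [PySem.List.length_pyRange_one]
  omega

-- the bit-plane for distance pos, element by element
theorem pvPlane_eq_map (g : List Int) (NUM T pos : Int)
    (hpos : 1 ≤ pos) (hT : 1 ≤ T) (hpre : T = 1 ∨ T ≤ (g.length : Int)) :
    pvPlane g NUM T pos
    = (PySem.List.pyRange 0 T 1).map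
        (fun i =>
          if i + pos < T ∧ PySem.Int.band (PySem.List.pyGetD g (i+pos) 0) (pvBit (pos - 1)) ≠ 0 then
            pvBit (NUM - pos)
          else 0) := by
  unfold pvPlane
  rw [PySem.List.slice_toNat g (by omega) (by omega)]
  set p := pos.toNat with hp
  set t := T.toNat with ht
  have hcl : ((List.take (t - p) (List.drop p g)).map
      (fun x => if PySem.Int.band x (pvBit (pos - 1)) ≠ 0 then pvBit (NUM - pos) else (0:Int))).length
      = min (t - p) (g.length - p) := by
    simp [List.length_take, List.length_drop]
  apply List.ext_getElem
  · simp only [List.length_append, List.length_map, List.length_replicate,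
      PySem.List.length_pyRange_one, List.length_take, List.length_drop]
    omega
  · intro k h1 h2
    rw [List.length_map, PySem.List.length_pyRange_one] at h2
    have hk : k < t := by omega
    rw [List.getElem_map, PySem.List.getElem_pyRange_one]
    by_cases hcase : k < min (t - p) (g.length - p)
    · rw [List.getElem_append_left (by rw [hcl]; exact hcase)]
      rw [List.getElem_map, List.getElem_take, List.getElem_drop]
      have hidx : 0 + (k:Int) + pos = ((p + k : Nat) : Int) := by push_cast; omega
      have hlt : p + k < g.length := by omega
      have hgetd : PySem.List.pyGetD g (0 + (k:Int) + pos) 0 = g[p+k] := by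
        rw [hidx, PySem.List.pyGetD_natCast]
        simp [hlt]
      rw [hgetd]
      have hc : 0 + (k:Int) + pos < T := by omega
      by_cases hb : PySem.Int.band g[p+k] (pvBit (pos - 1)) ≠ 0
      · rw [if_pos hb, if_pos ⟨hc, hb⟩]
      · rw [if_neg hb, if_neg (by tauto)]
    · rw [List.getElem_append_right (by rw [hcl]; omega)]
      rw [List.getElem_replicate]
      rw [if_neg]
      rintro ⟨hlt, hbit⟩
      -- k ≥ min (t-p) (len-p); under hpre this forces 0+k+pos ≥ T
      rcases hpre with h | h
      · omega
      · omega

-- elementwise OR of two maps over the same index range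
theorem pvZipOr (r : List Int) (f c : Int → Int) :
    ((r.map f).zip (r.map c)).map (fun p => PySem.Int.bor p.1 p.2)
    = r.map (fun i => PySem.Int.bor (f i) (c i)) := by
  rw [List.zip_map', List.map_map]
  rfl

-- unfolding pvMaskUpto by its last distance
theorem pvMaskUpto_succ (g : List Int) (NUM T M i : Int) (hM : 0 ≤ M) :
    pvMaskUpto g NUM T (M+1) i
    = (if i + (M+1) < T ∧ PySem.Int.band (PySem.List.pyGetD g (i+(M+1)) 0) (pvBit ((M+1) - 1)) ≠ 0 then
        PySem.Int.bor (pvMaskUpto g NUM T M i) (pvBit (NUM - (M+1)))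
      else pvMaskUpto g NUM T M i) := by
  unfold pvMaskUpto
  rw [show M + 1 + 1 = (M+1) + 1 by ring,
      PySem.List.pyRange_one_succ_right (a := 1) (b := M+1) (by omega), List.foldl_append,
      List.foldl_cons, List.foldl_nil]

theorem pvMaskUpto_base (g : List Int) (NUM T M i : Int) (hM : M ≤ 0) :
    pvMaskUpto g NUM T M i = 0 := by
  unfold pvMaskUpto
  rw [PySem.List.pyRange_one_eq_nil (a := 1) (b := M+1) (by omega), List.foldl_nil]

-- B's plane reduction, distance by distance
theorem pvB_fold (g : List Int) (NUM T : Int) (hT : 1 ≤ T) (hpre : T = 1 ∨ T ≤ (g.length : Int))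
    (m : Nat) :
    (PySem.List.pyRange 1 ((m:Int)+1) 1).foldl
      (fun edges pos => ((edges.zip (pvPlane g NUM T pos)).map (fun p => PySem.Int.bor p.1 p.2)))
      (List.replicate T.toNat 0)
    = (PySem.List.pyRange 0 T 1).map (fun i => pvMaskUpto g NUM T (m:Int) i) := by
  induction m with
  | zero =>
    simp only [Nat.cast_zero, zero_add]
    rw [PySem.List.pyRange_one_eq_nil (a := 1) (b := 1) (by omega), List.foldl_nil,
        pvReplicate_eq_map]
    apply List.map_congr_left
    intro i _
    rw [pvMaskUpto_base g NUM T 0 i (by omega)]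
  | succ m ih =>
    have hcast : ((m+1 : Nat) : Int) = (m:Int) + 1 := by push_cast; ring
    rw [hcast, PySem.List.pyRange_one_succ_right (a := 1) (b := (m:Int)+1) (by omega),
        List.foldl_append, ih, List.foldl_cons, List.foldl_nil,
        pvPlane_eq_map g NUM T ((m:Int)+1) (by omega) hT hpre, pvZipOr]
    apply List.map_congr_left
    intro i _
    rw [pvMaskUpto_succ g NUM T (m:Int) i (by omega)]
    split_ifs with h
    · rfl
    · rw [PySem.Int.bor_zero]

-- distances beyond T-1 have no in-range target, so they add nothing to the mask
theorem pvMaskUpto_clip (g : List Int) (NUM T i : Int) (hT : 1 ≤ T) (hi : 0 ≤ i) :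
    pvMaskUpto g NUM T NUM i = pvMaskUpto g NUM T (min NUM (T-1)) i := by
  by_cases h : NUM ≤ T-1
  · rw [min_eq_left h]
  · rw [min_eq_right (by omega)]
    unfold pvMaskUpto
    rw [PySem.List.pyRange_one_append 1 ((T-1)+1) (NUM+1) (by omega) (by omega),
        List.foldl_append]
    have htail : ∀ acc0 : Int,
        (PySem.List.pyRange ((T-1)+1) (NUM+1) 1).foldl
          (fun acc pos =>
            if i + pos < T ∧ PySem.Int.band (PySem.List.pyGetD g (i+pos) 0) (pvBit (pos - 1)) ≠ 0 then
              PySem.Int.bor acc (pvBit (NUM - pos))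
            else acc) acc0 = acc0 := by
      intro acc0
      rw [PySem.List.foldl_congr_mem _ _ (fun acc _ => acc)]
      · exact PySem.List.foldl_ignore _ _
      · intro acc pos hpos
        rw [PySem.List.mem_pyRange_one] at hpos
        rw [if_neg (by rintro ⟨hx, -⟩; omega)]
    rw [htail]

-- folding the OR step from an empty accumulator stays empty
theorem pvFold_nil {α : Type} (l : List α) (f : α → List Int) :
    l.foldl (fun edges x => ((edges.zip (f x)).map (fun p => PySem.Int.bor p.1 p.2))) []
    = [] := by
  induction l with
  | nil => rfl
  | cons p l ih => simpa using ih

-- ===== VERDICT (by name: the statement is the Claim_ definition above) =====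
theorem generate_edges_from_golden_spec : Claim_equal_generate_edges_from_golden := by
  intro ge T NUM _ hpre
  unfold Spec_generate_edges_from_golden generate_edges_from_golden generate_edges_from_golden_alt
  simp only []
  -- A's side: inner loops become pvMaskUpto, the outer loop a map
  have hA : (PySem.List.pyRange 0 T 1).foldl
      (fun (edges : List Int) (i : Int) =>
        edges.set i.toNat
          ((PySem.List.pyRange (i+1) (i+1+NUM) 1).foldl
            (fun acc j =>
              if j < T then
                if PySem.Int.band (PySem.List.pyGetD ge j 0) (pvBit ((j - i) - 1)) ≠ 0 then
                  PySem.Int.bor acc (pvBit (NUM - (j - i)))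
                else acc
              else acc) 0))
      ((PySem.List.pyRange 0 T 1).map (fun _ => (0:Int)))
      = (PySem.List.pyRange 0 T 1).foldl
          (fun (e : List Int) (i : Int) => e.set i.toNat (pvMaskUpto ge NUM T NUM i))
          ((PySem.List.pyRange 0 T 1).map (fun _ => (0:Int))) := by
    apply PySem.List.foldl_congr_mem
    intro acc i _
    rw [pvA_inner ge T NUM i]
  rw [hA, pvA_outer' (fun i => pvMaskUpto ge NUM T NUM i) T
        ((PySem.List.pyRange 0 T 1).map (fun _ => (0:Int)))
        (by simp [PySem.List.length_pyRange_one]),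
      List.drop_of_length_le (by simp [PySem.List.length_pyRange_one]), List.append_nil]
  -- B's side: the plane-building loop is a map, the reduction a fold over distances
  have hplanes : (PySem.List.pyRange 1 (min NUM (T-1) + 1) 1).foldl
      (fun (planes : List (List Int)) pos =>
        planes ++ [(PySem.List.slice ge (some pos) (some T)).map
            (fun g => if PySem.Int.band g (pvBit (pos - 1)) ≠ 0 then pvBit (NUM - pos) else (0:Int))
          ++ List.replicate
            (T - (((PySem.List.slice ge (some pos) (some T)).map
              (fun g => if PySem.Int.band g (pvBit (pos - 1)) ≠ 0 then pvBit (NUM - pos) else (0:Int))).length : Int)).toNat 0]) []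
      = (PySem.List.pyRange 1 (min NUM (T-1) + 1) 1).map (fun pos => pvPlane ge NUM T pos) := by
    rw [PySem.List.foldl_append_singleton_eq_map, List.nil_append]
    rfl
  rw [hplanes, List.foldl_map]
  by_cases hT : 1 ≤ T
  · by_cases hN : min NUM (T-1) ≤ 0
    · rw [PySem.List.pyRange_one_eq_nil (a := 1) (b := min NUM (T-1) + 1) (by omega),
          List.foldl_nil, pvReplicate_eq_map]
      apply List.map_congr_left
      intro i hi
      rw [PySem.List.mem_pyRange_one] at hi
      rw [pvMaskUpto_clip ge NUM T i hT (by omega),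
          pvMaskUpto_base ge NUM T (min NUM (T-1)) i (by omega)]
    · have hpre' : T = 1 ∨ T ≤ (ge.length : Int) := by
        rcases hpre with h | h | h
        · omega
        · left; omega
        · right; exact h
      have hcast : (((min NUM (T-1)).toNat : Nat) : Int) = min NUM (T-1) :=
        Int.toNat_of_nonneg (by omega)
      have hB := pvB_fold ge NUM T hT hpre' (min NUM (T-1)).toNat
      rw [hcast] at hB
      rw [hB]
      apply List.map_congr_left
      intro i hi
      rw [PySem.List.mem_pyRange_one] at hi
      rw [pvMaskUpto_clip ge NUM T i hT (by omega)]
  · have h0 : T.toNat = 0 := by omega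
    rw [h0]
    simp only [List.replicate_zero]
    rw [pvFold_nil (PySem.List.pyRange 1 (min NUM (T-1) + 1) 1) (fun pos => pvPlane ge NUM T pos),
        PySem.List.pyRange_one_eq_nil (a := 0) (b := T) (by omega), List.map_nil]
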